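-- pv_equiv track=rewrite | github.com/brayden-sherrod/FTC-Server | FTC_test.py | calcAutoCones
-- ===== SOURCE A (Python) =====
-- autoScoreGuide = [ [2,3,2,3,2],
--                   [3,4,5,4,3],
--                   [2,5,2,5,2],
--                   [3,4,5,4,3],
--                   [2,3,2,3,2],]
--
-- def calcAutoCones(field, side):
--     flag = False
--     autoScore = 0
--     contest = 0
--     start = 0
--     end = 3
--     if side == 1:
--         start = 2
--         end = 5
--     for row in range(start, end):
--         for junction in range(len(field[row])):
--             for cone in range(len(field[row][junction])):
--                 if field[row][junction][cone] == 'MY_CONE':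
--                     if (row == 2):
--                         flag = True
--                     else:
--                         autoScore += autoScoreGuide[row][junction]
--                     if (row == 1 and junction) == 2 or (row == 3 and junction == 2):
--                         contest = 1
--     return (autoScore, contest, flag)
-- ===== SOURCE B (Python) =====
-- autoScoreGuide = [ [2,3,2,3,2],
--                   [3,4,5,4,3],
--                   [2,5,2,5,2],
--                   [3,4,5,4,3],
--                   [2,3,2,3,2],]
--
-- def calcAutoCones(field, side):
--     rows = [3, 4] if side == 1 else [0, 1]
--     autoScore = sum(autoScoreGuide[r][j] * junc.count('MY_CONE')
--                     for r in rows
--                     for j, junc in enumerate(field[r])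
--                     if 'MY_CONE' in junc)
--     flag = any('MY_CONE' in junc for junc in field[2])
--     crow = 3 if side == 1 else 1
--     contest = 1 if len(field[crow]) > 2 and 'MY_CONE' in field[crow][2] else 0
--     return (autoScore, contest, flag)
-- ===== Notes on version B (the rewrite author's own statement) =====
-- stated objective: simpler
-- what changed: Replaces the fused triple loop with mutable shared state by three independent passes: a sum over the non-centre rows for autoScore, an any() over row 2 for the flag, and a direct index-2 test of the single contest row determined by side.
import Mathlib
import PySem

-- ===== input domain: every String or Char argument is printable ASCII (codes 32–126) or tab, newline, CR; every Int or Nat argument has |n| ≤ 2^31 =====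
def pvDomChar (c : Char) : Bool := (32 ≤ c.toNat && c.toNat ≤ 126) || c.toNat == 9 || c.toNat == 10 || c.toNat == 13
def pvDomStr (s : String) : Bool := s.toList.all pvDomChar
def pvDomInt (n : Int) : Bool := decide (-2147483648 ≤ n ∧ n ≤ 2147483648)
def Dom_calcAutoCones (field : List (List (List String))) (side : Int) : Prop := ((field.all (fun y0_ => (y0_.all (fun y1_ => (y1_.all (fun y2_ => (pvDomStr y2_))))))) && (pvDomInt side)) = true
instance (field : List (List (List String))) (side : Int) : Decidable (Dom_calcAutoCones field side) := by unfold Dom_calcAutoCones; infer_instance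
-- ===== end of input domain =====

-- B computes the three results in three independent passes (a sum over the non-centre rows, an any() over
-- row 2, and a direct index-2 test of the one contest row) instead of A's fused triple loop with shared
-- mutable state; objective: simpler, same cost.

-- ===== PORT A =====
def autoScoreGuide : List (List Int) :=
  [[2,3,2,3,2],
   [3,4,5,4,3],
   [2,5,2,5,2],
   [3,4,5,4,3],
   [2,3,2,3,2]]

-- Python's '(row == 1 and junction) == 2': 'row == 1 and junction' is False when row ≠ 1 (and False == 2
-- is False); otherwise it is the int 'junction'.  Ported exactly.
def pyAndEq2 (row junction : Int) : Bool := if row == 1 then junction == 2 else false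

-- state (autoScore, contest, flag), exactly the Python return order
def calcAutoCones (field : List (List (List String))) (side : Int) : Int × Int × Bool :=
  let start : Int := if side == 1 then 2 else 0
  let stop : Int := if side == 1 then 5 else 3
  (PySem.List.pyRange start stop 1).foldl (fun st row =>
    (PySem.List.pyRange 0 ((PySem.List.pyGetD field row []).length : Int) 1).foldl (fun st junction =>
      (PySem.List.pyRange 0 ((PySem.List.pyGetD (PySem.List.pyGetD field row []) junction []).length : Int) 1).foldl (fun st cone =>
        if PySem.List.pyGetD (PySem.List.pyGetD (PySem.List.pyGetD field row []) junction []) cone "" == "MY_CONE" then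
          let st1 := if row == 2 then (st.1, st.2.1, true)
            else (st.1 + PySem.List.pyGetD (PySem.List.pyGetD autoScoreGuide row []) junction 0, st.2.1, st.2.2)
          if pyAndEq2 row junction || (row == 3 && junction == 2) then (st1.1, 1, st1.2.2) else st1
        else st) st) st) ((0 : Int), (0 : Int), false)

-- ===== PORT B =====
def calcAutoCones_alt (field : List (List (List String))) (side : Int) : Int × Int × Bool :=
  let rows : List Int := if side == 1 then [3, 4] else [0, 1]
  let autoScore : Int := rows.foldl (fun acc r =>
    (PySem.List.enumerate (PySem.List.pyGetD field r [])).foldl (fun acc p =>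
      if "MY_CONE" ∈ p.2 then
        acc + PySem.List.pyGetD (PySem.List.pyGetD autoScoreGuide r []) p.1 0 * (p.2.count "MY_CONE" : Int)
      else acc) acc) 0
  let flag : Bool := (PySem.List.pyGetD field 2 []).any (fun junc => decide ("MY_CONE" ∈ junc))
  let crow : Int := if side == 1 then 3 else 1
  let contest : Int :=
    if 2 < (PySem.List.pyGetD field crow []).length ∧ "MY_CONE" ∈ PySem.List.pyGetD (PySem.List.pyGetD field crow []) 2 []
    then 1 else 0
  (autoScore, contest, flag)

-- ===== PRECONDITION & SPEC =====
-- Pre_ = exactly the inputs where Python A returns: the field has all rows of the scanned window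
-- (field[row] would raise IndexError otherwise), and no non-centre row of the window holds 'MY_CONE'
-- at a junction index ≥ 5 (autoScoreGuide[row][junction] would raise IndexError there).
def Pre_calcAutoCones (field : List (List (List String))) (side : Int) : Prop :=
  (if side = 1 then 5 else 3) ≤ field.length ∧
  ∀ r ∈ (if side = 1 then ([3, 4] : List Nat) else [0, 1]),
    ∀ junc ∈ (field.getD r []).drop 5, "MY_CONE" ∉ junc
instance (field : List (List (List String))) (side : Int) : Decidable (Pre_calcAutoCones field side) := by
  unfold Pre_calcAutoCones; infer_instance

def pvWitness_calcAutoCones : List (List (List String)) × Int :=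
  ([[["MY_CONE"]], [[], [], ["MY_CONE", "X"]], [["MY_CONE"]]], 0)

def Spec_calcAutoCones (field : List (List (List String))) (side : Int) (out : Int × Int × Bool) : Prop := out = calcAutoCones_alt field side
instance (field : List (List (List String))) (side : Int) (out : Int × Int × Bool) : Decidable (Spec_calcAutoCones field side out) := by unfold Spec_calcAutoCones; infer_instance

-- ===== CLAIM (what is proved, stated in full; the proofs are below) =====
def Claim_equal_calcAutoCones : Prop := ∀ (field : List (List (List String))) (side : Int), Dom_calcAutoCones field side → Pre_calcAutoCones field side → Spec_calcAutoCones field side (calcAutoCones field side)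

-- ===== LEMMAS AND PROOFS =====

-- abbreviations for the pieces of A's loop body
def G (r j : Int) : Int := PySem.List.pyGetD (PySem.List.pyGetD autoScoreGuide r []) j 0

def cndB (r j : Int) : Bool := pyAndEq2 r j || (r == 3 && j == 2)

def coneF (r j : Int) (st : Int × Int × Bool) (cone : String) : Int × Int × Bool :=
  if cone == "MY_CONE" then
    let st1 := if r == 2 then (st.1, st.2.1, true) else (st.1 + G r j, st.2.1, st.2.2)
    if cndB r j then (st1.1, 1, st1.2.2) else st1
  else st

def jstep (r : Int) (st : Int × Int × Bool) (p : Int × List String) : Int × Int × Bool :=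
  (st.1 + (if r == 2 then 0 else G r p.1 * (p.2.count "MY_CONE" : Int)),
   if cndB r p.1 && decide ("MY_CONE" ∈ p.2) then 1 else st.2.1,
   st.2.2 || ((r == 2) && decide ("MY_CONE" ∈ p.2)))

theorem coneF_foldl (r j : Int) (J : List String) (st : Int × Int × Bool) :
    J.foldl (coneF r j) st = jstep r st (j, J) := by
  induction J generalizing st with
  | nil => simp [jstep]
  | cons x J ih =>
    obtain ⟨s, c, f⟩ := st
    by_cases hx : x = "MY_CONE"
    · subst hx
      simp only [List.foldl_cons, ih, coneF, jstep]
      cases hr : (r == 2) <;> cases hc : cndB r j <;>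
        simp <;> ring
    · simp only [List.foldl_cons, ih, coneF, jstep]
      simp [hx, Ne.symm hx]

theorem jfold (r : Int) (L : List (List String)) (s0 : Int) (st : Int × Int × Bool) :
    (PySem.List.enumerate L s0).foldl (jstep r) st =
      (st.1 + ((PySem.List.enumerate L s0).map
          (fun p => if r == 2 then 0 else G r p.1 * (p.2.count "MY_CONE" : Int))).sum,
       if (PySem.List.enumerate L s0).any (fun p => cndB r p.1 && decide ("MY_CONE" ∈ p.2)) then 1 else st.2.1,
       st.2.2 || ((r == 2) && L.any (fun junc => decide ("MY_CONE" ∈ junc)))) := by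
  induction L generalizing s0 st with
  | nil => simp [PySem.List.enumerate_nil]
  | cons J L ih =>
    obtain ⟨s, c, f⟩ := st
    simp only [PySem.List.enumerate_cons, List.foldl_cons, ih, jstep, List.map_cons, List.sum_cons,
      List.any_cons]
    refine Prod.ext ?_ (Prod.ext ?_ ?_)
    · simp [add_assoc]
    · cases h1 : (cndB r s0 && decide ("MY_CONE" ∈ J)) <;>
        cases h2 : (PySem.List.enumerate L (s0+1)).any (fun p => cndB r p.1 && decide ("MY_CONE" ∈ p.2)) <;> simp
    · cases hr : (r == 2) <;> cases hm : decide ("MY_CONE" ∈ J) <;> simp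

theorem rowA (r : Int) (rowL : List (List String)) (st : Int × Int × Bool) :
    (PySem.List.pyRange 0 (rowL.length : Int) 1).foldl (fun st junction =>
      (PySem.List.pyRange 0 ((PySem.List.pyGetD rowL junction []).length : Int) 1).foldl (fun st cone =>
        if PySem.List.pyGetD (PySem.List.pyGetD rowL junction []) cone "" == "MY_CONE" then
          let st1 := if r == 2 then (st.1, st.2.1, true)
            else (st.1 + PySem.List.pyGetD (PySem.List.pyGetD autoScoreGuide r []) junction 0, st.2.1, st.2.2)
          if pyAndEq2 r junction || (r == 3 && junction == 2) then (st1.1, 1, st1.2.2) else st1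
        else st) st) st
    = (PySem.List.enumerate rowL 0).foldl (jstep r) st := by
  have hbody : (fun (st : Int × Int × Bool) (junction : Int) =>
      (PySem.List.pyRange 0 ((PySem.List.pyGetD rowL junction []).length : Int) 1).foldl (fun st cone =>
        if PySem.List.pyGetD (PySem.List.pyGetD rowL junction []) cone "" == "MY_CONE" then
          let st1 := if r == 2 then (st.1, st.2.1, true)
            else (st.1 + PySem.List.pyGetD (PySem.List.pyGetD autoScoreGuide r []) junction 0, st.2.1, st.2.2)
          if pyAndEq2 r junction || (r == 3 && junction == 2) then (st1.1, 1, st1.2.2) else st1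
        else st) st)
      = (fun st junction => jstep r st (junction, PySem.List.pyGetD rowL junction [])) := by
    funext st junction
    have h1 : (fun (st : Int × Int × Bool) (cone : Int) =>
        if PySem.List.pyGetD (PySem.List.pyGetD rowL junction []) cone "" == "MY_CONE" then
          let st1 := if r == 2 then (st.1, st.2.1, true)
            else (st.1 + PySem.List.pyGetD (PySem.List.pyGetD autoScoreGuide r []) junction 0, st.2.1, st.2.2)
          if pyAndEq2 r junction || (r == 3 && junction == 2) then (st1.1, 1, st1.2.2) else st1
        else st)
        = (fun st cone => coneF r junction st (PySem.List.pyGetD (PySem.List.pyGetD rowL junction []) cone "")) := rfl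
    rw [h1, PySem.List.foldl_pyRange_zero_pyGetD' (PySem.List.pyGetD rowL junction []) ""
        (coneF r junction) st, coneF_foldl]
  rw [hbody, PySem.List.enumerate_eq_map_pyRange rowL ([] : List String), List.foldl_map]
  simp [PySem.List.len]

theorem bfold (r : Int) (L : List (List String)) (s0 a : Int) :
    (PySem.List.enumerate L s0).foldl (fun acc p =>
      if "MY_CONE" ∈ p.2 then
        acc + PySem.List.pyGetD (PySem.List.pyGetD autoScoreGuide r []) p.1 0 * (p.2.count "MY_CONE" : Int)
      else acc) a
    = a + ((PySem.List.enumerate L s0).map (fun p => G r p.1 * (p.2.count "MY_CONE" : Int))).sum := by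
  induction L generalizing s0 a with
  | nil => simp [PySem.List.enumerate_nil]
  | cons J L ih =>
    simp only [PySem.List.enumerate_cons, List.foldl_cons, List.map_cons, List.sum_cons, ih]
    by_cases hm : "MY_CONE" ∈ J
    · simp only [hm, if_pos, G]
      ring
    · simp [hm, List.count_eq_zero.mpr hm, G]

theorem anyIdx2 (L : List (List String)) :
    ((PySem.List.enumerate L 0).any (fun p => (p.1 == 2) && decide ("MY_CONE" ∈ p.2)) = true)
    ↔ (2 < L.length ∧ "MY_CONE" ∈ PySem.List.pyGetD (L : List (List String)) 2 []) := by
  simp only [List.any_eq_true, PySem.List.mem_enumerate_iff, Bool.and_eq_true, beq_iff_eq,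
    decide_eq_true_eq]
  constructor
  · rintro ⟨p, ⟨k, hk, rfl⟩, h2, hm⟩
    simp only [zero_add] at h2 hm
    have hk2 : k = 2 := by exact_mod_cast h2
    subst hk2
    refine ⟨hk, ?_⟩
    rw [PySem.List.pyGetD_eq_getElem L [] (by norm_num) (by exact_mod_cast hk)]
    simpa using hm
  · rintro ⟨hlen, hm⟩
    refine ⟨((2 : Int), L[2]'hlen), ⟨2, hlen, by simp⟩, by simp, ?_⟩
    rw [PySem.List.pyGetD_eq_getElem L [] (by norm_num) (by exact_mod_cast hlen)] at hm
    simpa using hm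

theorem calcAutoCones_eq_alt (field : List (List (List String))) (side : Int) :
    calcAutoCones field side = calcAutoCones_alt field side := by
  by_cases hs : side = 1
  · subst hs
    simp only [calcAutoCones, calcAutoCones_alt,
      show ((1 : Int) == 1) = true from rfl, if_true,
      show PySem.List.pyRange 2 5 1 = [2, 3, 4] from by decide,
      List.foldl_cons, List.foldl_nil]
    rw [rowA 2, rowA 3, rowA 4, jfold, jfold, jfold,
      bfold 3 (PySem.List.pyGetD field 3 []) 0, bfold 4 (PySem.List.pyGetD field 4 []) 0]
    simp [cndB, pyAndEq2, G]
    simp only [Bool.false_or, Bool.true_and]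
    rw [if_congr (anyIdx2 (PySem.List.pyGetD field 3 [])) rfl rfl]
  · have hb : (side == 1) = false := by simp [hs]
    simp only [calcAutoCones, calcAutoCones_alt, hb, Bool.false_eq_true, if_false,
      show PySem.List.pyRange 0 3 1 = [0, 1, 2] from by decide,
      List.foldl_cons, List.foldl_nil]
    rw [rowA 0, rowA 1, rowA 2, jfold, jfold, jfold,
      bfold 0 (PySem.List.pyGetD field 0 []) 0, bfold 1 (PySem.List.pyGetD field 1 []) 0]
    simp [cndB, pyAndEq2, G]
    simp only [Bool.or_false, Bool.false_and]
    rw [if_congr (anyIdx2 (PySem.List.pyGetD field 1 [])) rfl rfl]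

-- ===== VERDICT (by name: the statement is the Claim_ definition above) =====
theorem calcAutoCones_spec : Claim_equal_calcAutoCones := by
  intro field side _ _
  unfold Spec_calcAutoCones
  exact calcAutoCones_eq_alt field side
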